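-- pv_equiv track=rewrite | github.com/DigiZiggy/Python | EX09A/princesses.py | sort_by_status
-- ===== SOURCE A (Python) =====
-- def sort_by_status(filtered_lines) -> list:
--     """
--     Sort lines by pattern FIGHTS FOR LIFE > INJURED > IN PANIC > BORED.
--
--     FIGHTS FOR LIFE comes before INJURED etc.
--
--     :param filtered_lines:
--     :return: sorted lines.
--     """
--     first = []
--     second = []
--     third = []
--     forth = []
--     for each in filtered_lines:
--         if each[1] == "FIGHTS FOR LIFE":
--             first.append(each)
--         if each[1] == "INJURED":
--             second.append(each)
--         if each[1] == "IN PANIC":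
--             third.append(each)
--         if each[1] == "BORED":
--             forth.append(each)
--     return first + second + third + forth
-- ===== SOURCE B (Python) =====
-- def sort_by_status(filtered_lines) -> list:
--     order = {"FIGHTS FOR LIFE": 0, "INJURED": 1, "IN PANIC": 2, "BORED": 3}
--     kept = [each for each in filtered_lines if each[1] in order]
--     return sorted(kept, key=lambda each: order[each[1]])
-- ===== Notes on version B (the rewrite author's own statement) =====
-- stated objective: idiomatic
-- what changed: Replaces the four manual buckets and concatenation with a priority-rank dict, one filter pass for the recognised statuses, and a single stable sort on the rank.
import Mathlib
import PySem

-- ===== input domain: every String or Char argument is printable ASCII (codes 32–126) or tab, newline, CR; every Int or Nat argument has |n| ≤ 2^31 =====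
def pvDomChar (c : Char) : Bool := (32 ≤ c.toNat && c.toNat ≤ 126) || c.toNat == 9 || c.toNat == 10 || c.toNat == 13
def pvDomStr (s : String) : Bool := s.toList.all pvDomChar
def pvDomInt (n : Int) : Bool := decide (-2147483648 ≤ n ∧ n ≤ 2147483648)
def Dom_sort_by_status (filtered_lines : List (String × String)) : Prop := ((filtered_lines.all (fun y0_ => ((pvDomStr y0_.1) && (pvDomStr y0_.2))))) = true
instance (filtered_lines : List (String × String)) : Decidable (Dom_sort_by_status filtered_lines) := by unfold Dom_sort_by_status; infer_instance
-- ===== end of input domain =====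

-- B replaces A's four manual buckets with a rank dict + filter + one stable sort (objective: idiomatic).

-- ===== PORT A =====
-- literal port of A: one pass appending into four bucket lists, then concatenation
def sort_by_status (filtered_lines : List (String × String)) : List (String × String) :=
  let r := filtered_lines.foldl
    (fun (acc : List (String × String) × List (String × String) × List (String × String) × List (String × String)) each =>
      let acc := if each.2 == "FIGHTS FOR LIFE" then (acc.1 ++ [each], acc.2.1, acc.2.2.1, acc.2.2.2) else acc
      let acc := if each.2 == "INJURED" then (acc.1, acc.2.1 ++ [each], acc.2.2.1, acc.2.2.2) else acc
      let acc := if each.2 == "IN PANIC" then (acc.1, acc.2.1, acc.2.2.1 ++ [each], acc.2.2.2) else acc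
      let acc := if each.2 == "BORED" then (acc.1, acc.2.1, acc.2.2.1, acc.2.2.2 ++ [each]) else acc
      acc)
    ([], [], [], [])
  r.1 ++ r.2.1 ++ r.2.2.1 ++ r.2.2.2

-- ===== PORT B =====
-- the priority-rank dict of B
def pvOrder : PySem.Dict String Int :=
  PySem.Dict.ofList [("FIGHTS FOR LIFE", 0), ("INJURED", 1), ("IN PANIC", 2), ("BORED", 3)]

-- port of B: keep recognised statuses, stable-sort by rank (order[each[1]] always present on kept, ported as getD)
def sort_by_status_alt (filtered_lines : List (String × String)) : List (String × String) :=
  let kept := filtered_lines.filter (fun each => pvOrder.contains each.2)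
  PySem.List.sorted kept (fun each => pvOrder.getD each.2 0)

-- ===== PRECONDITION & SPEC =====
def Spec_sort_by_status (filtered_lines : List (String × String)) (out : List (String × String)) : Prop := out = sort_by_status_alt filtered_lines
instance (filtered_lines : List (String × String)) (out : List (String × String)) : Decidable (Spec_sort_by_status filtered_lines out) := by unfold Spec_sort_by_status; infer_instance

-- ===== CLAIM (what is proved, stated in full; the proofs are below) =====
def Claim_equal_sort_by_status : Prop := ∀ (filtered_lines : List (String × String)), Dom_sort_by_status filtered_lines → Spec_sort_by_status filtered_lines (sort_by_status filtered_lines)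

-- ===== LEMMAS AND PROOFS =====

-- A's bucket loop computes the four status filters
theorem bucketLoop (l : List (String × String))
    (a b c d : List (String × String)) :
    l.foldl
      (fun (acc : List (String × String) × List (String × String) × List (String × String) × List (String × String)) each =>
        let acc := if each.2 == "FIGHTS FOR LIFE" then (acc.1 ++ [each], acc.2.1, acc.2.2.1, acc.2.2.2) else acc
        let acc := if each.2 == "INJURED" then (acc.1, acc.2.1 ++ [each], acc.2.2.1, acc.2.2.2) else acc
        let acc := if each.2 == "IN PANIC" then (acc.1, acc.2.1, acc.2.2.1 ++ [each], acc.2.2.2) else acc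
        let acc := if each.2 == "BORED" then (acc.1, acc.2.1, acc.2.2.1, acc.2.2.2 ++ [each]) else acc
        acc)
      (a, b, c, d)
    = (a ++ l.filter (fun e => e.2 == "FIGHTS FOR LIFE"),
       b ++ l.filter (fun e => e.2 == "INJURED"),
       c ++ l.filter (fun e => e.2 == "IN PANIC"),
       d ++ l.filter (fun e => e.2 == "BORED")) := by
  induction l generalizing a b c d with
  | nil => simp
  | cons x t ih =>
      simp only [List.foldl_cons, List.filter_cons]
      split_ifs <;> simp_all

-- insertBy passes over a block it does not go before
theorem insertBy_append_of_forall_not_before {α : Type} (before : α → α → Bool) (x : α)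
    (ys zs : List α) (h : ∀ y ∈ ys, before x y = false) :
    PySem.List.insertBy before x (ys ++ zs) = ys ++ PySem.List.insertBy before x zs := by
  induction ys with
  | nil => simp
  | cons y t ih =>
      simp only [List.cons_append, PySem.List.insertBy]
      rw [h y (by simp)]
      simp only [if_neg Bool.false_ne_true]
      rw [ih (fun y hy => h y (by simp [hy]))]

-- insertBy goes straight to the front when it is before everything
theorem insertBy_cons_of_forall_before {α : Type} (before : α → α → Bool) (x : α)
    (zs : List α) (h : ∀ y ∈ zs, before x y = true) :
    PySem.List.insertBy before x zs = x :: zs := by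
  cases zs with
  | nil => rfl
  | cons z t => simp [PySem.List.insertBy, h z (by simp)]

-- stable sort of a list whose keys all lie in {0,1,2,3} is the concatenation of the key-filters
theorem sorted_four_ranks {α : Type} (xs : List α) (key : α → Int)
    (h : ∀ x ∈ xs, key x = 0 ∨ key x = 1 ∨ key x = 2 ∨ key x = 3) :
    PySem.List.sorted xs key =
      xs.filter (fun e => decide (key e = 0)) ++ xs.filter (fun e => decide (key e = 1)) ++
      xs.filter (fun e => decide (key e = 2)) ++ xs.filter (fun e => decide (key e = 3)) := by
  rw [PySem.List.sorted_eq_foldl_insertBy]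
  induction xs using List.reverseRecOn with
  | nil => simp
  | append_singleton t x ih =>
      rw [List.foldl_append, List.foldl_cons, List.foldl_nil,
        ih (fun y hy => h y (by simp [hy]))]
      have hf : ∀ (i : Int), ∀ y ∈ t.filter (fun e => decide (key e = i)), key y = i := by
        intro i y hy
        have := List.of_mem_filter hy
        simpa using this
      rcases h x (by simp) with hr | hr | hr | hr
      · rw [show t.filter (fun e => decide (key e = 0)) ++ t.filter (fun e => decide (key e = 1)) ++
              t.filter (fun e => decide (key e = 2)) ++ t.filter (fun e => decide (key e = 3)) =
              t.filter (fun e => decide (key e = 0)) ++ (t.filter (fun e => decide (key e = 1)) ++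
              (t.filter (fun e => decide (key e = 2)) ++ t.filter (fun e => decide (key e = 3))))
            from by simp [List.append_assoc]]
        rw [insertBy_append_of_forall_not_before _ x _ _ (by
          intro y hy; rw [hf 0 y hy, hr]; decide)]
        rw [insertBy_cons_of_forall_before _ x _ (by
          intro y hy
          simp only [List.mem_append] at hy
          rcases hy with hy | hy | hy
          · rw [hf 1 y hy, hr]; decide
          · rw [hf 2 y hy, hr]; decide
          · rw [hf 3 y hy, hr]; decide)]
        simp [List.filter_append, hr, List.append_assoc]
      · rw [show t.filter (fun e => decide (key e = 0)) ++ t.filter (fun e => decide (key e = 1)) ++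
              t.filter (fun e => decide (key e = 2)) ++ t.filter (fun e => decide (key e = 3)) =
              (t.filter (fun e => decide (key e = 0)) ++ t.filter (fun e => decide (key e = 1))) ++
              (t.filter (fun e => decide (key e = 2)) ++ t.filter (fun e => decide (key e = 3)))
            from by simp [List.append_assoc]]
        rw [insertBy_append_of_forall_not_before _ x _ _ (by
          intro y hy
          simp only [List.mem_append] at hy
          rcases hy with hy | hy
          · rw [hf 0 y hy, hr]; decide
          · rw [hf 1 y hy, hr]; decide)]
        rw [insertBy_cons_of_forall_before _ x _ (by
          intro y hy
          simp only [List.mem_append] at hy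
          rcases hy with hy | hy
          · rw [hf 2 y hy, hr]; decide
          · rw [hf 3 y hy, hr]; decide)]
        simp [List.filter_append, hr, List.append_assoc]
      · rw [show t.filter (fun e => decide (key e = 0)) ++ t.filter (fun e => decide (key e = 1)) ++
              t.filter (fun e => decide (key e = 2)) ++ t.filter (fun e => decide (key e = 3)) =
              (t.filter (fun e => decide (key e = 0)) ++ t.filter (fun e => decide (key e = 1)) ++
              t.filter (fun e => decide (key e = 2))) ++ t.filter (fun e => decide (key e = 3))
            from by simp [List.append_assoc]]
        rw [insertBy_append_of_forall_not_before _ x _ _ (by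
          intro y hy
          simp only [List.mem_append] at hy
          rcases hy with (hy | hy) | hy
          · rw [hf 0 y hy, hr]; decide
          · rw [hf 1 y hy, hr]; decide
          · rw [hf 2 y hy, hr]; decide)]
        rw [insertBy_cons_of_forall_before _ x _ (by
          intro y hy; rw [hf 3 y hy, hr]; decide)]
        simp [List.filter_append, hr, List.append_assoc]
      · rw [PySem.List.insertBy_of_forall_not_before _ x _ (by
          intro y hy
          simp only [List.mem_append] at hy
          rcases hy with ((hy | hy) | hy) | hy
          · rw [hf 0 y hy, hr]; decide
          · rw [hf 1 y hy, hr]; decide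
          · rw [hf 2 y hy, hr]; decide
          · rw [hf 3 y hy, hr]; decide)]
        simp [List.filter_append, hr, List.append_assoc]


-- pvOrder as a literal Dict
theorem pvOrder_eq : pvOrder = PySem.Dict.mk [("FIGHTS FOR LIFE", 0), ("INJURED", 1), ("IN PANIC", 2), ("BORED", 3)] := by rfl

-- characterisation of B's kept-and-rank test, one conjunct per status
theorem pvKey_cases (s : String) :
    ((decide (pvOrder.getD s 0 = 0) && pvOrder.contains s) = (s == "FIGHTS FOR LIFE")) ∧
    ((decide (pvOrder.getD s 0 = 1) && pvOrder.contains s) = (s == "INJURED")) ∧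
    ((decide (pvOrder.getD s 0 = 2) && pvOrder.contains s) = (s == "IN PANIC")) ∧
    ((decide (pvOrder.getD s 0 = 3) && pvOrder.contains s) = (s == "BORED")) := by
  rcases eq_or_ne s "FIGHTS FOR LIFE" with h | h0
  · subst h; decide
  rcases eq_or_ne s "INJURED" with h | h1
  · subst h; decide
  rcases eq_or_ne s "IN PANIC" with h | h2
  · subst h; decide
  rcases eq_or_ne s "BORED" with h | h3
  · subst h; decide
  have e0 : ("FIGHTS FOR LIFE" == s) = false := by simpa using Ne.symm h0
  have e1 : ("INJURED" == s) = false := by simpa using Ne.symm h1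
  have e2 : ("IN PANIC" == s) = false := by simpa using Ne.symm h2
  have e3 : ("BORED" == s) = false := by simpa using Ne.symm h3
  have f0 : (s == "FIGHTS FOR LIFE") = false := by simpa using h0
  have f1 : (s == "INJURED") = false := by simpa using h1
  have f2 : (s == "IN PANIC") = false := by simpa using h2
  have f3 : (s == "BORED") = false := by simpa using h3
  refine ⟨?_, ?_, ?_, ?_⟩ <;>
    simp [pvOrder_eq, PySem.Dict.contains_mk, e0, e1, e2, e3, f0, f1, f2, f3]

-- the rank of a recognised status lies in {0,1,2,3}
theorem pvKey_range (s : String) (h : pvOrder.contains s = true) :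
    pvOrder.getD s 0 = 0 ∨ pvOrder.getD s 0 = 1 ∨ pvOrder.getD s 0 = 2 ∨ pvOrder.getD s 0 = 3 := by
  rcases eq_or_ne s "FIGHTS FOR LIFE" with h' | h0
  · subst h'; decide
  rcases eq_or_ne s "INJURED" with h' | h1
  · subst h'; decide
  rcases eq_or_ne s "IN PANIC" with h' | h2
  · subst h'; decide
  rcases eq_or_ne s "BORED" with h' | h3
  · subst h'; decide
  have e0 : ("FIGHTS FOR LIFE" == s) = false := by simpa using Ne.symm h0
  have e1 : ("INJURED" == s) = false := by simpa using Ne.symm h1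
  have e2 : ("IN PANIC" == s) = false := by simpa using Ne.symm h2
  have e3 : ("BORED" == s) = false := by simpa using Ne.symm h3
  simp [pvOrder_eq, PySem.Dict.contains_mk, e0, e1, e2, e3] at h

-- ===== VERDICT (by name: the statement is the Claim_ definition above) =====
theorem sort_by_status_spec : Claim_equal_sort_by_status := by
  intro fl _
  unfold Spec_sort_by_status sort_by_status sort_by_status_alt
  rw [bucketLoop]
  rw [sorted_four_ranks _ _ (fun x hx => pvKey_range x.2 (by simpa using List.of_mem_filter hx))]
  simp only [List.filter_filter, List.nil_append]
  have h1 := List.filter_congr (l := fl) (fun e (_ : e ∈ fl) => (pvKey_cases e.2).1)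
  have h2 := List.filter_congr (l := fl) (fun e (_ : e ∈ fl) => (pvKey_cases e.2).2.1)
  have h3 := List.filter_congr (l := fl) (fun e (_ : e ∈ fl) => (pvKey_cases e.2).2.2.1)
  have h4 := List.filter_congr (l := fl) (fun e (_ : e ∈ fl) => (pvKey_cases e.2).2.2.2)
  rw [h1, h2, h3, h4]
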